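-- pv_equiv track=rewrite | github.com/minh5499999/minh5499999 | code lap 4.3.py | tim_ky_tu
-- ===== SOURCE A (Python) =====
-- def tim_ky_tu(chuoi, i):
--     # Kiểm tra tính hợp lệ của i nhập vào
--     if i < 1 or i > len(chuoi):
--         return '!'
--
--     # Tìm ký tự xuất hiện i lần trong chuỗi
--     for j in range(len(chuoi) - i + 1):
--         ky_tu = chuoi[j]
--         count = 1
--         for k in range(j + 1, j + i):
--             if chuoi[k] == ky_tu:
--                 count += 1
--
--         if count == i:
--             return ky_tu
--
--     return '!'
-- ===== SOURCE B (Python) =====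
-- def tim_ky_tu(chuoi, i):
--     if i < 1 or i > len(chuoi):
--         return '!'
--     prev = None
--     run = 0
--     for ch in chuoi:
--         if ch == prev:
--             run += 1
--         else:
--             prev = ch
--             run = 1
--         if run == i:
--             return ch
--     return '!'
-- ===== Notes on version B (the rewrite author's own statement) =====
-- stated objective: faster
-- what changed: Replaces A's nested scan (for every start position, recount i characters) by a single pass that tracks the length of the current run of equal characters and returns as soon as a run reaches i.
import Mathlib
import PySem

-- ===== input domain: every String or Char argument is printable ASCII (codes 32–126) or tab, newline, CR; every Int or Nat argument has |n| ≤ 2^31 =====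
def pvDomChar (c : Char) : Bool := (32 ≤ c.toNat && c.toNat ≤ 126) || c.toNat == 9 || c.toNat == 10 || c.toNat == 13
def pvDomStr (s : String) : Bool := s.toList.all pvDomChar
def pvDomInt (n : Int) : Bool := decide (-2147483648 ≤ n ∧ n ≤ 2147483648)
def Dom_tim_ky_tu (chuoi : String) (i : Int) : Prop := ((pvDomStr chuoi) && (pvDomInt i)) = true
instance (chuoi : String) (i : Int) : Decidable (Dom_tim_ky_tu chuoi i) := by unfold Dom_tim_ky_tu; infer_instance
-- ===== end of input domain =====

-- B replaces A's nested scan (recount i chars from every start position) by one pass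
-- tracking the current run length: objective = faster.

-- ===== PORT A =====
-- inner loop `for k in range(j+1, j+i): if chuoi[k] == ky_tu: count += 1`
-- (all indices used are in range, so Nat indexing with a default is exact here)
def timA_count (cs : List Char) (ky : Char) (ks : List Nat) (count : Nat) : Nat :=
  ks.foldl (fun c k => if cs.getD k ' ' = ky then c + 1 else c) count

-- outer loop `for j in range(len(chuoi)-i+1)` with early return
def timA_outer (cs : List Char) (i : Nat) : List Nat → String
  | [] => "!"
  | j :: js =>
    let ky := cs.getD j ' '
    let count := timA_count cs ky (List.range' (j+1) (i-1)) 1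
    if count = i then String.ofList [ky] else timA_outer cs i js

def tim_ky_tu (chuoi : String) (i : Int) : String :=
  let cs := chuoi.toList
  if i < 1 ∨ i > (cs.length : Int) then "!"
  else timA_outer cs i.toNat (List.range (cs.length - i.toNat + 1))

-- ===== PORT B =====
-- single pass: prev = previous char (None at start), run = current run length;
-- return ch as soon as run == i
def scanB (i : Nat) : List Char → Option Char → Nat → String
  | [], _, _ => "!"
  | ch :: rest, prev, run =>
    let run' := if some ch = prev then run + 1 else 1
    if run' = i then String.ofList [ch] else scanB i rest (some ch) run'

def tim_ky_tu_alt (chuoi : String) (i : Int) : String :=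
  let cs := chuoi.toList
  if i < 1 ∨ i > (cs.length : Int) then "!"
  else scanB i.toNat cs none 0

-- ===== PRECONDITION & SPEC =====
def Spec_tim_ky_tu (chuoi : String) (i : Int) (out : String) : Prop := out = tim_ky_tu_alt chuoi i
instance (chuoi : String) (i : Int) (out : String) : Decidable (Spec_tim_ky_tu chuoi i out) := by unfold Spec_tim_ky_tu; infer_instance

-- ===== CLAIM (what is proved, stated in full; the proofs are below) =====
def Claim_equal_tim_ky_tu : Prop := ∀ (chuoi : String) (i : Int), Dom_tim_ky_tu chuoi i → Spec_tim_ky_tu chuoi i (tim_ky_tu chuoi i)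

-- ===== LEMMAS AND PROOFS =====

-- common specification: first suffix whose i-prefix is constant (and long enough), rendered
def firstRun (i : Nat) : List Char → Option Char
  | [] => none
  | c :: rest =>
    if i ≤ (c :: rest).length ∧ ((c :: rest).take i).all (fun b => b == c) then some c
    else firstRun i rest

def render : Option Char → String
  | some c => String.ofList [c]
  | none => "!"

theorem firstRun_none_of_short (i : Nat) (xs : List Char) (h : xs.length < i) :
    firstRun i xs = none := by
  induction xs with
  | nil => simp [firstRun]
  | cons c rest ih =>
    have h1 : rest.length < i := by simp only [List.length_cons] at h; omega
    simp only [firstRun, ih h1]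
    rw [if_neg]
    rintro ⟨hlen, -⟩
    have hc : (c :: rest).length = rest.length + 1 := by simp
    omega

theorem firstRun_replicate_self (i : Nat) (hi : 1 ≤ i) (c : Char) (t : List Char) :
    firstRun i (List.replicate i c ++ t) = some c := by
  obtain ⟨m, rfl⟩ : ∃ m, i = m + 1 := ⟨i - 1, by omega⟩
  simp only [List.replicate_succ, List.cons_append, firstRun]
  rw [if_pos]
  constructor
  · simp
  · rw [List.take_succ_cons, List.take_append_of_le_length (by simp)]
    simp

theorem firstRun_skip (i : Nat) (c d : Char) (hne : d ≠ c) :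
    ∀ (r : Nat), r < i → ∀ t, firstRun i (List.replicate r c ++ d :: t) = firstRun i (d :: t) := by
  intro r
  induction r with
  | zero => intro _ t; simp
  | succ r ih =>
    intro hr t
    have hstep : firstRun i (c :: (List.replicate r c ++ d :: t))
        = firstRun i (List.replicate r c ++ d :: t) := by
      simp only [firstRun]
      rw [if_neg]
      rintro ⟨hlen, hall⟩
      -- the taken window contains d (at index r+1 < i), which is ≠ c
      have hd : d ∈ (c :: (List.replicate r c ++ d :: t)).take i := by
        have heq : (c :: (List.replicate r c ++ d :: t)).take i
            = c :: (List.replicate r c ++ (d :: t).take (i - (r + 1))) := by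
          obtain ⟨m, rfl⟩ : ∃ m, i = m + 1 := ⟨i - 1, by omega⟩
          rw [List.take_succ_cons, List.take_append]
          simp [List.take_replicate]
          omega
        rw [heq]
        obtain ⟨m2, hm2⟩ : ∃ m2, i - (r+1) = m2 + 1 := ⟨i - (r+1) - 1, by omega⟩
        simp [hm2]
      have := List.all_eq_true.mp hall d hd
      simp at this
      exact hne this
    rw [List.replicate_succ, List.cons_append, hstep, ih (by omega) t]

-- B's scan, in terms of firstRun
theorem scanB_eq (i : Nat) (hi : 1 ≤ i) :
    ∀ (t : List Char) (c : Char) (r : Nat), 1 ≤ r → r < i →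
      scanB i t (some c) r = render (firstRun i (List.replicate r c ++ t)) := by
  intro t
  induction t with
  | nil =>
    intro c r _ hri
    rw [firstRun_none_of_short i _ (by simpa using hri)]
    simp [scanB, render]
  | cons d t ih =>
    intro c r hr hri
    by_cases hdc : d = c
    · subst hdc
      have hlist : List.replicate r d ++ d :: t = List.replicate (r+1) d ++ t := by
        rw [List.replicate_succ']; simp
      show (if (if some d = some d then r + 1 else 1) = i then String.ofList [d]
            else scanB i t (some d) (if some d = some d then r + 1 else 1))
          = render (firstRun i (List.replicate r d ++ d :: t))
      rw [if_pos rfl]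
      by_cases hcase : r + 1 = i
      · rw [if_pos hcase, hlist, hcase, firstRun_replicate_self i hi, render]
      · rw [if_neg hcase, ih d (r+1) (by omega) (by omega), hlist]
    · have hprev : ¬ (some d = some c) := by simp [hdc]
      show (if (if some d = some c then r + 1 else 1) = i then String.ofList [d]
            else scanB i t (some d) (if some d = some c then r + 1 else 1))
          = render (firstRun i (List.replicate r c ++ d :: t))
      rw [if_neg hprev, firstRun_skip i c d hdc r hri t]
      by_cases hcase : (1 : Nat) = i
      · rw [if_pos hcase, ← hcase]
        simp [firstRun, render]
      · rw [if_neg hcase, ih d 1 (by omega) (by omega)]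
        simp

theorem scanB_top (i : Nat) (hi : 1 ≤ i) (cs : List Char) :
    scanB i cs none 0 = render (firstRun i cs) := by
  cases cs with
  | nil => simp [scanB, firstRun, render]
  | cons c rest =>
    show (if (if some c = none then 0 + 1 else 1) = i then String.ofList [c]
          else scanB i rest (some c) (if some c = none then 0 + 1 else 1))
        = render (firstRun i (c :: rest))
    rw [if_neg (by simp : ¬ (some c = (none : Option Char)))]
    by_cases hcase : (1 : Nat) = i
    · rw [if_pos hcase, ← hcase]
      simp [firstRun, render]
    · rw [if_neg hcase, scanB_eq i hi rest c 1 le_rfl (by omega)]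
      simp

-- A's counting loop = 1 + number of matching positions
theorem timA_count_eq (cs : List Char) (ky : Char) (ks : List Nat) (a : Nat) :
    timA_count cs ky ks a = a + ks.countP (fun k => decide (cs.getD k ' ' = ky)) := by
  induction ks generalizing a with
  | nil => simp [timA_count]
  | cons k ks ih =>
    have hstep : timA_count cs ky (k :: ks) a
        = timA_count cs ky ks (if cs.getD k ' ' = ky then a + 1 else a) := rfl
    rw [hstep, ih, List.countP_cons]
    by_cases h : cs.getD k ' ' = ky
    · rw [if_pos h, decide_eq_true h]
      simp; omega
    · rw [if_neg h, decide_eq_false h]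
      simp

theorem timA_outer_eq (cs : List Char) (i : Nat) (hi : 1 ≤ i) :
    ∀ (l j : Nat), j + l + i = cs.length + 1 →
      timA_outer cs i (List.range' j l) = render (firstRun i (cs.drop j)) := by
  intro l
  induction l with
  | zero =>
    intro j hj
    have : (cs.drop j).length < i := by simp; omega
    simp [timA_outer, firstRun_none_of_short i _ this, render]
  | succ l ih =>
    intro j hj
    have hjlt : j < cs.length := by omega
    have hile : i ≤ cs.length - j := by omega
    have hiub : j + i ≤ cs.length := by omega
    have hjk : ∀ k, k < i → j + k < cs.length := fun k hk => by omega
    rw [List.range'_succ]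
    simp only [timA_outer, timA_count_eq]
    have hdrop : cs.drop j = cs[j] :: cs.drop (j+1) := (List.getElem_cons_drop hjlt).symm
    have hgetD : cs.getD j ' ' = cs[j] := List.getD_eq_getElem cs ' ' hjlt
    have hcond : (1 + (List.range' (j+1) (i-1)).countP (fun k => decide (cs.getD k ' ' = cs.getD j ' ')) = i)
        ↔ (i ≤ (cs.drop j).length ∧ ((cs.drop j).take i).all (fun b => b == cs[j])) := by
      have hlen : (List.range' (j+1) (i-1)).length = i - 1 := by simp
      constructor
      · intro hcount
        refine ⟨by simpa using hile, ?_⟩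
        have hall : ∀ k ∈ List.range' (j+1) (i-1), decide (cs.getD k ' ' = cs.getD j ' ') = true := by
          apply List.countP_eq_length.mp
          omega
        rw [List.all_eq_true]
        intro b hb
        rw [List.mem_iff_getElem] at hb
        obtain ⟨k, hk, hbk⟩ := hb
        have hki : k < i := lt_of_lt_of_le hk (List.length_take_le i _)
        have hbval : b = cs[j + k]'(hjk k hki) := by
          rw [← hbk, List.getElem_take, List.getElem_drop]
        rcases Nat.eq_zero_or_pos k with hk0 | hkpos
        · subst hk0; simp [hbval]
        · have hmem : j + k ∈ List.range' (j+1) (i-1) := by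
            rw [List.mem_range'_1]
            omega
          have hkk := of_decide_eq_true (hall _ hmem)
          rw [hgetD, List.getD_eq_getElem cs ' ' (hjk k hki)] at hkk
          simp [hbval, hkk]
      · rintro ⟨-, hall⟩
        have hset : ∀ k ∈ List.range' (j+1) (i-1), decide (cs.getD k ' ' = cs.getD j ' ') = true := by
          intro k hk
          rw [List.mem_range'_1] at hk
          have hklt : k < cs.length := by omega
          have hmem : cs[k] ∈ (cs.drop j).take i := by
            rw [List.mem_iff_getElem]
            refine ⟨k - j, by simp; omega, ?_⟩
            rw [List.getElem_take, List.getElem_drop]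
            congr 1
            omega
          have hbk := List.all_eq_true.mp hall _ hmem
          rw [hgetD, List.getD_eq_getElem cs ' ' hklt]
          simpa using hbk
        rw [List.countP_eq_length.mpr hset, hlen]
        omega
    by_cases hc : 1 + (List.range' (j+1) (i-1)).countP (fun k => decide (cs.getD k ' ' = cs.getD j ' ')) = i
    · rw [if_pos hc, hdrop]
      simp only [firstRun]
      rw [if_pos (by rw [← hdrop]; exact hcond.mp hc)]
      simp [render, List.getElem?_eq_getElem hjlt]
    · rw [if_neg hc, hdrop]
      simp only [firstRun]
      rw [if_neg (by rw [← hdrop]; exact fun h => hc (hcond.mpr h))]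
      rw [← ih (j+1) (by omega)]

-- ===== VERDICT (by name: the statement is the Claim_ definition above) =====
theorem tim_ky_tu_spec : Claim_equal_tim_ky_tu := by
  intro chuoi i _
  simp only [Spec_tim_ky_tu, tim_ky_tu, tim_ky_tu_alt]
  split_ifs with hv
  · rfl
  · rw [not_or] at hv
    have hi1 : 1 ≤ i.toNat := by omega
    have hin : i.toNat ≤ chuoi.toList.length := by
      have h2 : ¬ i > (chuoi.toList.length : Int) := hv.2
      omega
    rw [List.range_eq_range',
      timA_outer_eq chuoi.toList i.toNat hi1 (chuoi.toList.length - i.toNat + 1) 0 (by omega),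
      scanB_top i.toNat hi1]
    simp
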